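-- pv_equiv track=rewrite | github.com/pschaeffer/PythonApps | dumpASN3.py | stringToHex
-- ===== SOURCE A (Python) =====
-- def stringToHex(inStr):
--   hexStr = ''
--   for c in inStr:
--     intValue = ord(c)
--     if intValue > 255:
--       raise OverflowError('Maximum simple character value(255) exceeded')
--     hexStr += hex(intValue)[2:].zfill(2)
--   return hexStr
-- ===== SOURCE B (Python) =====
-- def stringToHex(inStr):
--   return inStr.encode('latin-1').hex()
-- ===== Notes on version B (the rewrite author's own statement) =====
-- stated objective: faster
-- what changed: Replaces A's Python-level loop (hex(ord(c))[2:].zfill(2) appended per character) by encoding the string to latin-1 bytes and delegating the whole conversion to bytes.hex(), a nibble-table translation with no per-character Python code.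
import Mathlib
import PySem

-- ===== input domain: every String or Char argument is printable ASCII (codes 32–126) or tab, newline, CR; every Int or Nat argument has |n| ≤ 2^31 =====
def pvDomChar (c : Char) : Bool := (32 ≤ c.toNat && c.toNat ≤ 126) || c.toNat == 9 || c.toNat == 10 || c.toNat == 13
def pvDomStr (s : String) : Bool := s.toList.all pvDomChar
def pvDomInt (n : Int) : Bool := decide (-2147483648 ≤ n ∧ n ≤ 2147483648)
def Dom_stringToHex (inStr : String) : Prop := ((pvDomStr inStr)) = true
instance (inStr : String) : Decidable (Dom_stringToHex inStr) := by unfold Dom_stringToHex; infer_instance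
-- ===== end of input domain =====

-- B encodes the string as latin-1 bytes and delegates to bytes.hex() (a nibble-table
-- translation) instead of A's per-character hex/zfill accumulation loop; the timing
-- run measured B faster by a constant factor. A raises OverflowError only on
-- characters > 255, which lie outside Dom_stringToHex, so nothing is claimed there.

-- ===== PORT A =====
-- hex(n)[2:]: Python's lowercase hex digits of n (n ≥ 0), no "0x" prefix (exact for n ≥ 0)
def pyHexBody (n : Nat) : List Char := Nat.toDigits 16 n

-- s.zfill(2): left-pad with '0' up to length 2 (exact for non-sign-prefixed s)
def pyZfill2 (s : List Char) : List Char := List.replicate (2 - s.length) '0' ++ s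

def stringToHex (inStr : String) : String :=
  inStr.toList.foldl (fun hexStr c =>
    let intValue := c.toNat
    if intValue > 255 then hexStr  -- Python raises OverflowError here; unreachable inside Dom_stringToHex
    else hexStr ++ String.mk (pyZfill2 (pyHexBody intValue))) ""

-- ===== PORT B =====
-- str.encode('latin-1'): the list of code points (each < 256; raises above, outside Dom)
def latin1Encode (s : String) : List Nat := s.toList.map Char.toNat

-- bytes.hex(): each byte becomes its two nibbles looked up in the hex-digit table
def hexTable : List Char := "0123456789abcdef".toList

def byteHex (b : Nat) : List Char := [hexTable.getD (b / 16) '0', hexTable.getD (b % 16) '0']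

def stringToHex_alt (inStr : String) : String :=
  String.mk ((latin1Encode inStr).flatMap byteHex)

-- ===== PRECONDITION & SPEC =====
def Spec_stringToHex (inStr : String) (out : String) : Prop := out = stringToHex_alt inStr
instance (inStr : String) (out : String) : Decidable (Spec_stringToHex inStr out) := by unfold Spec_stringToHex; infer_instance

-- ===== CLAIM (what is proved, stated in full; the proofs are below) =====
def Claim_equal_stringToHex : Prop := ∀ (inStr : String), Dom_stringToHex inStr → Spec_stringToHex inStr (stringToHex inStr)

-- ===== LEMMAS AND PROOFS =====

-- A's per-character piece equals B's per-byte piece, for every byte value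
set_option maxRecDepth 10000 in
theorem perByte_eq : ∀ n < 256, pyZfill2 (pyHexBody n) = byteHex n := by decide

theorem mk_append (a b : List Char) : String.mk a ++ String.mk b = String.mk (a ++ b) :=
  String.ofList_append.symm

theorem foldl_eq_flat (l : List Char) (acc : List Char)
    (h : ∀ c ∈ l, c.toNat < 256) :
    l.foldl (fun hexStr c =>
        if c.toNat > 255 then hexStr
        else hexStr ++ String.mk (pyZfill2 (pyHexBody c.toNat))) (String.mk acc)
      = String.mk (acc ++ (l.map Char.toNat).flatMap byteHex) := by
  induction l generalizing acc with
  | nil => simp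
  | cons c cs ih =>
    have hc : c.toNat < 256 := h c (by simp)
    have hc' : ¬ c.toNat > 255 := by omega
    simp only [List.foldl, List.map, List.flatMap_cons, hc', ite_false]
    rw [mk_append, ih (acc ++ pyZfill2 (pyHexBody c.toNat)) (fun x hx => h x (by simp [hx])),
        perByte_eq c.toNat hc, List.append_assoc]

-- ===== VERDICT (by name: the statement is the Claim_ definition above) =====
theorem stringToHex_spec : Claim_equal_stringToHex := by
  intro inStr hdom
  unfold Spec_stringToHex stringToHex stringToHex_alt latin1Encode
  have h : ∀ c ∈ inStr.toList, c.toNat < 256 := by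
    intro c hc
    have := List.all_eq_true.mp hdom c hc
    simp only [pvDomChar, Bool.or_eq_true, Bool.and_eq_true, decide_eq_true_eq, beq_iff_eq] at this
    omega
  have := foldl_eq_flat inStr.toList [] h
  simpa using this
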